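-- pv_equiv track=rewrite | github.com/eduardo-aog/CalculoNumerico | Repositories/SignificantDigits.py | __utilValFractionFormat
-- ===== SOURCE A (Python) =====
-- def __utilValFractionFormat(num):
--     n = 0
--     for i in num:
--         if "." in num and (n == 0 and i == "."):
--             return False
--         if ("." in num and "-" in num) and (n == 1 and i == "."):
--             return False
--         if i == ".":
--             return True
--         n += 1
--     return True
-- ===== SOURCE B (Python) =====
-- def __utilValFractionFormat(num):
--     p = num.find('.')
--     if p == -1:
--         return True
--     if p == 0:
--         return False
--     if p == 1 and '-' in num:
--         return False
--     return True
-- ===== Notes on version B (the rewrite author's own statement) =====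
-- stated objective: simpler
-- what changed: Replaces the per-character loop, which re-scans the whole string for membership on every iteration, by a single first-occurrence position lookup of the decimal point followed by three guards.
import Mathlib
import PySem

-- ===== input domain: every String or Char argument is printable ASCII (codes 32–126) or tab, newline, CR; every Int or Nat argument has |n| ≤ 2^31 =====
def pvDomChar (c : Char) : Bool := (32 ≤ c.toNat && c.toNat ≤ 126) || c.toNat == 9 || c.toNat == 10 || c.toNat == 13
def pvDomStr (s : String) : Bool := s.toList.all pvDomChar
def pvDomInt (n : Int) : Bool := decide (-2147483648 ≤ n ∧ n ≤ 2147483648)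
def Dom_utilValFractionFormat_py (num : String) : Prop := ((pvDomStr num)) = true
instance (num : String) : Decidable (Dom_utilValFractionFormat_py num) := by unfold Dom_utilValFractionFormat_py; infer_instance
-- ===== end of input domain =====

-- B replaces A's per-character loop (which re-scans the whole string for membership each
-- iteration) by one first-occurrence lookup of the decimal point and three guards.

-- ===== PORT A =====
-- A's for-loop over the characters, carrying the counter n; '"." in num' is the substring test
-- PySem.Chars.isIn (exact; the needle is the single char '.').
def utilValFractionFormat_pyGo (num : List Char) (l : List Char) (n : Int) : Bool :=
  match l with
  | [] => true
  | i :: rest =>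
    if PySem.Chars.isIn ['.'] num && (n == 0 && i == '.') then false
    else if (PySem.Chars.isIn ['.'] num && PySem.Chars.isIn ['-'] num) && (n == 1 && i == '.') then false
    else if i == '.' then true
    else utilValFractionFormat_pyGo num rest (n + 1)

def utilValFractionFormat_py (num : String) : Bool :=
  utilValFractionFormat_pyGo num.toList num.toList 0

-- ===== PORT B =====
-- B: p = num.find('.'); -1 → True; 0 → False; 1 with '-' present → False; else True.
def utilValFractionFormat_py_alt (num : String) : Bool :=
  let p := PySem.Chars.find num.toList ['.']
  if p == -1 then true
  else if p == 0 then false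
  else if p == 1 && PySem.Chars.isIn ['-'] num.toList then false
  else true

-- ===== PRECONDITION & SPEC =====
def Spec_utilValFractionFormat_py (num : String) (out : Bool) : Prop := out = utilValFractionFormat_py_alt num
instance (num : String) (out : Bool) : Decidable (Spec_utilValFractionFormat_py num out) := by unfold Spec_utilValFractionFormat_py; infer_instance

-- ===== CLAIM (what is proved, stated in full; the proofs are below) =====
def Claim_equal_utilValFractionFormat_py : Prop := ∀ (num : String), Dom_utilValFractionFormat_py num → Spec_utilValFractionFormat_py num (utilValFractionFormat_py num)

-- ===== LEMMAS AND PROOFS =====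

-- [c] is a prefix of l exactly when l starts with c.
theorem pv_singleton_prefix_iff (c : Char) (l : List Char) : [c] <+: l ↔ l.head? = some c := by
  cases l with
  | nil => simp
  | cons a t =>
    constructor
    · rintro ⟨s, hs⟩; simp at hs; simp [hs.1]
    · intro h; simp at h; exact ⟨t, by simp [h]⟩

-- If '.' occurs nowhere in l, A's loop returns True regardless of n.
theorem pvGo_no_dot (num l : List Char) (n : Int) (h : ∀ c ∈ l, c ≠ '.') :
    utilValFractionFormat_pyGo num l n = true := by
  induction l generalizing n with
  | nil => rfl
  | cons i rest ih =>
    have hi : i ≠ '.' := h i (by simp)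
    simp only [utilValFractionFormat_pyGo]
    simp [hi, ih _ (fun c hc => h c (by simp [hc]))]

-- A's loop computed via the index of the first '.' in the remaining list l.
theorem pvGo_findIdx (num : List Char) (hdot : PySem.Chars.isIn ['.'] num = true)
    (l : List Char) (n : Nat) :
    utilValFractionFormat_pyGo num l (n : Int) =
      (if l.findIdx (· == '.') < l.length then
        (if n + l.findIdx (· == '.') == 0 then false
         else if (PySem.Chars.isIn ['-'] num && (n + l.findIdx (· == '.') == 1)) then false
         else true)
       else true) := by
  induction l generalizing n with
  | nil => simp [utilValFractionFormat_pyGo]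
  | cons i rest ih =>
    by_cases hi : i = '.'
    · subst hi
      simp only [utilValFractionFormat_pyGo, hdot, List.findIdx_cons, beq_self_eq_true,
        cond_true, List.length_cons]
      by_cases hn : n = 0
      · subst hn; simp
      · have hn' : ¬((n : Int) = 0) := by exact_mod_cast hn
        by_cases hm : PySem.Chars.isIn ['-'] num = true
        · by_cases h1 : n = 1
          · simp [hm, h1]
          · have h1' : ¬((n : Int) = 1) := by exact_mod_cast h1
            simp [hm, hn, h1, h1']
        · rw [Bool.not_eq_true] at hm
          simp [hm, hn]
    · have hi' : (i == '.') = false := by simp [hi]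
      simp only [utilValFractionFormat_pyGo, hi', List.findIdx_cons, cond_false]
      have hcast : (n : Int) + 1 = ((n + 1 : Nat) : Int) := by push_cast; ring
      rw [hcast, ih (n + 1)]
      have harr : n + 1 + rest.findIdx (· == '.') = n + (rest.findIdx (· == '.') + 1) := by
        omega
      simp only [List.length_cons, harr]
      by_cases hlt : rest.findIdx (· == '.') < rest.length
      · have h1 : rest.findIdx (· == '.') + 1 < rest.length + 1 := by omega
        simp [hlt, h1]
      · have h1 : ¬(rest.findIdx (· == '.') + 1 < rest.length + 1) := by omega
        simp [hlt, h1]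

-- When '.' occurs in cs, find cs ['.'] is the index of the first '.', i.e. findIdx.
theorem pv_find_eq_findIdx (cs : List Char) (h : '.' ∈ cs) :
    PySem.Chars.find cs ['.'] = (cs.findIdx (· == '.') : Int) := by
  have hinf : ['.'] <:+: cs := (List.singleton_infix_iff _ _).2 h
  have hpos : 0 ≤ PySem.Chars.find cs ['.'] := (PySem.Chars.find_nonneg_iff cs ['.']).2 hinf
  obtain ⟨hpre, hmin⟩ := PySem.Chars.find_spec hpos
  set j := (PySem.Chars.find cs ['.']).toNat with hj
  have hhead : (cs.drop j).head? = some '.' := (pv_singleton_prefix_iff _ _).1 hpre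
  rw [List.head?_drop] at hhead
  have hjlt : j < cs.length := by
    by_contra hge
    rw [List.getElem?_eq_none (by omega)] at hhead
    simp at hhead
  have hgetj : cs[j] = '.' := by
    rw [List.getElem?_eq_getElem hjlt] at hhead
    exact Option.some.inj hhead
  have : cs.findIdx (· == '.') = j := by
    rw [List.findIdx_eq hjlt]
    refine ⟨by simp [hgetj], fun k hk => ?_⟩
    have := hmin k hk
    rw [pv_singleton_prefix_iff, List.head?_drop] at this
    have hklt : k < cs.length := by omega
    rw [List.getElem?_eq_getElem hklt] at this
    simp only [beq_eq_false_iff_ne, ne_eq]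
    intro hc; exact this (by simp [hc])
  omega

-- ===== VERDICT (by name: the statement is the Claim_ definition above) =====
theorem utilValFractionFormat_py_spec : Claim_equal_utilValFractionFormat_py := by
  intro num _
  unfold Spec_utilValFractionFormat_py utilValFractionFormat_py utilValFractionFormat_py_alt
  set cs := num.toList with hcs
  by_cases hmem : '.' ∈ cs
  · have hdot : PySem.Chars.isIn ['.'] cs = true :=
      (PySem.Chars.isIn_iff_infix _ _).2 ((List.singleton_infix_iff _ _).2 hmem)
    have hfind := pv_find_eq_findIdx cs hmem
    have hA := pvGo_findIdx cs hdot cs 0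
    norm_num at hA
    rw [hA, hfind]
    set k := cs.findIdx (· == '.') with hk
    have hklt : k < cs.length := List.findIdx_lt_length.2 ⟨'.', hmem, by simp⟩
    by_cases h0 : k = 0
    · simp [h0, hmem]
    · have hne : ¬((k : Int) = -1) := by omega
      have hne0 : ¬((k : Int) = 0) := by exact_mod_cast h0
      by_cases h1 : k = 1
      · by_cases hm : PySem.Chars.isIn ['-'] cs = true
        · simp [h1, hm, hmem]
        · simp [h1, hm, hmem]
      · have hne1 : ¬((k : Int) = 1) := by exact_mod_cast h1
        simp [h0, h1, hne, hne1, hmem]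
  · have hninf : ¬ ['.'] <:+: cs := fun h => hmem ((List.singleton_infix_iff _ _).1 h)
    have hfind : PySem.Chars.find cs ['.'] = -1 := (PySem.Chars.find_eq_neg_one_iff _ _).2 hninf
    have hA : utilValFractionFormat_pyGo cs cs 0 = true :=
      pvGo_no_dot cs cs 0 (fun c hc hceq => hmem (hceq ▸ hc))
    rw [hA, hfind]
    simp
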